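-- pv_equiv track=rewrite | github.com/Pushks18/Wet-Lab-msa | src/phase3_sec_form_d.py | quarters_through
-- ===== SOURCE A (Python) =====
-- START_YEAR = 2015
--
-- START_Q = 1
--
-- def quarters_through(end_year: int, end_q: int) -> list[tuple[int, int]]:
--     out = []
--     y, q = START_YEAR, START_Q
--     while (y, q) <= (end_year, end_q):
--         out.append((y, q))
--         q += 1
--         if q > 4:
--             q = 1
--             y += 1
--     return out
-- ===== SOURCE B (Python) =====
-- START_YEAR = 2015
--
-- START_Q = 1
--
-- def quarters_through(end_year: int, end_q: int) -> list[tuple[int, int]]: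
--     return [(y, q)
--             for y in range(START_YEAR, end_year + 1)
--             for q in range(1, 5)
--             if (y, q) <= (end_year, end_q)]
-- ===== Notes on version B (the rewrite author's own statement) =====
-- stated objective: idiomatic
-- what changed: Replaced the stateful while-loop with manual quarter increment and year carry by a nested comprehension over the year-by-quarter grid filtered by the same tuple comparison against the end point.
import Mathlib
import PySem

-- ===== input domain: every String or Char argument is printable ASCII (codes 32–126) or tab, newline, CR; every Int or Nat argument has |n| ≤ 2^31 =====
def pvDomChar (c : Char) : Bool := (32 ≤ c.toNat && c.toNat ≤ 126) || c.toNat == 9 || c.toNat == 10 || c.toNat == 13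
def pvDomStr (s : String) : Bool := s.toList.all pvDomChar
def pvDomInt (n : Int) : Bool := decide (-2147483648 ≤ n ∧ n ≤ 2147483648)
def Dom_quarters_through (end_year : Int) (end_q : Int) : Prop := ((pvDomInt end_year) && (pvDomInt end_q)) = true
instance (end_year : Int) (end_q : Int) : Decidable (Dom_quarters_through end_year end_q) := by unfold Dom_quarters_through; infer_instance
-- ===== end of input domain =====

-- B replaces A's stateful while-loop (manual quarter increment with year carry) by a
-- nested comprehension over the year×quarter grid filtered by the same tuple comparison.

-- ===== PORT A =====
-- A's while loop: state (y, q) plus the accumulating list `out`.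
def quartersLoop (end_year : Int) (end_q : Int) (y : Int) (q : Int) (out : List (Int × Int)) : List (Int × Int) :=
  if y < end_year ∨ (y = end_year ∧ q ≤ end_q) then   -- (y, q) <= (end_year, end_q)
    -- out.append((y, q)); q += 1; if q > 4: q = 1; y += 1
    if q + 1 > 4 then quartersLoop end_year end_q (y + 1) 1 (out ++ [(y, q)])
    else quartersLoop end_year end_q y (q + 1) (out ++ [(y, q)])
  else out
termination_by ((end_year + 1 - y).toNat, (5 - q).toNat)
decreasing_by
  · apply Prod.Lex.left; omega
  · apply Prod.Lex.right; omega

def quarters_through (end_year : Int) (end_q : Int) : List (Int × Int) :=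
  quartersLoop end_year end_q 2015 1 []

-- ===== PORT B =====
def quarters_through_alt (end_year : Int) (end_q : Int) : List (Int × Int) :=
  (PySem.List.pyRange 2015 (end_year + 1) 1).flatMap (fun y =>
    ((PySem.List.pyRange 1 5 1).filter
        (fun q => decide (y < end_year ∨ (y = end_year ∧ q ≤ end_q)))).map (fun q => (y, q)))

-- ===== PRECONDITION & SPEC =====
def Spec_quarters_through (end_year : Int) (end_q : Int) (out : List (Int × Int)) : Prop := out = quarters_through_alt end_year end_q
instance (end_year : Int) (end_q : Int) (out : List (Int × Int)) : Decidable (Spec_quarters_through end_year end_q out) := by unfold Spec_quarters_through; infer_instance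

-- ===== CLAIM (what is proved, stated in full; the proofs are below) =====
def Claim_equal_quarters_through : Prop := ∀ (end_year : Int) (end_q : Int), Dom_quarters_through end_year end_q → Spec_quarters_through end_year end_q (quarters_through end_year end_q)

-- ===== LEMMAS AND PROOFS =====

-- one year's block of B's comprehension
def yearBlock (end_year : Int) (end_q : Int) (lo : Int) (y : Int) : List (Int × Int) :=
  ((PySem.List.pyRange lo 5 1).filter
      (fun q => decide (y < end_year ∨ (y = end_year ∧ q ≤ end_q)))).map (fun q => (y, q))

lemma yearBlock_empty_of_gt (end_year end_q lo y : Int) (h : end_year < y) :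
    yearBlock end_year end_q lo y = [] := by
  unfold yearBlock
  rw [List.filter_eq_nil_iff.mpr, List.map_nil]
  intro q _
  simp only [decide_eq_true_eq]
  omega

lemma loop_eq (end_year end_q y q : Int) (out : List (Int × Int)) :
    q ≤ 4 →
    quartersLoop end_year end_q y q out =
      out ++ yearBlock end_year end_q q y ++
        (PySem.List.pyRange (y + 1) (end_year + 1) 1).flatMap
          (yearBlock end_year end_q 1) := by
  fun_induction quartersLoop end_year end_q y q out with
  | case1 y q out hguard hq4 ih =>
    -- q + 1 > 4, so with the bound q ≤ 4 we have q = 4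
    intro hq
    have hq' : q = 4 := by omega
    subst hq'
    rw [ih (by norm_num)]
    have hb4 : yearBlock end_year end_q 4 y = [(y, 4)] := by
      unfold yearBlock
      have h45 : PySem.List.pyRange 4 5 1 = [4] := by decide
      rw [h45]
      have hc : (decide (y < end_year) || (decide (y = end_year) && decide ((4:Int) ≤ end_q))) = true := by
        rcases hguard with h | ⟨h1, h2⟩
        · simp [h]
        · simp [h1, h2]
      simp [hc]
    rcases hguard with hlt | ⟨heq, _⟩
    · rw [hb4, PySem.List.pyRange_one_cons (show y + 1 < end_year + 1 by omega),
          List.flatMap_cons]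
      simp [List.append_assoc]
    · rw [hb4, PySem.List.pyRange_one_eq_nil (show end_year + 1 ≤ y + 1 by omega),
          PySem.List.pyRange_one_eq_nil (show end_year + 1 ≤ y + 1 + 1 by omega),
          yearBlock_empty_of_gt end_year end_q 1 (y + 1) (by omega)]
      simp
  | case2 y q out hguard hq4 ih =>
    intro hq
    rw [ih (by omega)]
    have hsplit : yearBlock end_year end_q q y = (y, q) :: yearBlock end_year end_q (q + 1) y := by
      unfold yearBlock
      rw [PySem.List.pyRange_one_cons (show q < 5 by omega)]
      have hc : (decide (y < end_year) || (decide (y = end_year) && decide (q ≤ end_q))) = true := by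
        rcases hguard with h | ⟨h1, h2⟩
        · simp [h]
        · simp [h1, h2]
      simp [hc]
    rw [hsplit]
    simp [List.append_assoc]
  | case3 y q out hguard =>
    intro hq
    have hblock : yearBlock end_year end_q q y = [] := by
      unfold yearBlock
      rw [List.filter_eq_nil_iff.mpr, List.map_nil]
      intro qq hqq
      rw [PySem.List.mem_pyRange_one] at hqq
      simp only [decide_eq_true_eq]
      omega
    have hrest : (PySem.List.pyRange (y + 1) (end_year + 1) 1).flatMap
        (yearBlock end_year end_q 1) = [] := by
      rw [List.flatMap_eq_nil_iff]
      intro yy hyy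
      rw [PySem.List.mem_pyRange_one] at hyy
      exact yearBlock_empty_of_gt end_year end_q 1 yy (by omega)
    rw [hblock, hrest]
    simp

-- ===== VERDICT (by name: the statement is the Claim_ definition above) =====
theorem quarters_through_spec : Claim_equal_quarters_through := by
  intro end_year end_q _
  unfold Spec_quarters_through quarters_through
  have hB : quarters_through_alt end_year end_q =
      (PySem.List.pyRange 2015 (end_year + 1) 1).flatMap (yearBlock end_year end_q 1) := rfl
  rw [hB, loop_eq end_year end_q 2015 1 [] (by norm_num)]
  rcases lt_or_ge end_year 2015 with h | h
  · rw [PySem.List.pyRange_one_eq_nil (show end_year + 1 ≤ 2015 by omega),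
        PySem.List.pyRange_one_eq_nil (show end_year + 1 ≤ 2015 + 1 by omega),
        yearBlock_empty_of_gt end_year end_q 1 2015 (by omega)]
    simp
  · rw [PySem.List.pyRange_one_cons (show (2015:Int) < end_year + 1 by omega),
        List.flatMap_cons]
    simp
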